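-- pv_equiv track=rewrite | github.com/jinjin0528/pythonStudy | BRONZE/baekjoon_32068.py | find_treasure_step
-- ===== SOURCE A (Python) =====
-- def find_treasure_step(L, R, S):
--     pos = S
--     step = 1
--     delta = 1
--     sign = 1  # 첫 이동은 +1 (오른쪽)
--
--     while True:
--         if L == pos or R == pos:
--             return step
--         pos += sign * delta
--         delta += 1
--         sign *= -1
--         step += 1
-- ===== SOURCE B (Python) =====
-- def find_treasure_step(L, R, S):
--     # Closed form: the walk visits S, S+1, S-1, S+2, S-2, ... at steps 1,2,3,4,5,...
--     # so target T = S+d is reached at step 1 (d==0), 2*d (d>0), or 1-2*d (d<0).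
--     def steps_to(t):
--         d = t - S
--         if d == 0:
--             return 1
--         return 2 * d if d > 0 else 1 - 2 * d
--     return min(steps_to(L), steps_to(R))
-- ===== Notes on version B (the rewrite author's own statement) =====
-- stated objective: faster
-- what changed: Replaces the step-by-step zigzag simulation with a closed-form formula for the step at which each target is reached, returning the minimum of the two.
import Mathlib
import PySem

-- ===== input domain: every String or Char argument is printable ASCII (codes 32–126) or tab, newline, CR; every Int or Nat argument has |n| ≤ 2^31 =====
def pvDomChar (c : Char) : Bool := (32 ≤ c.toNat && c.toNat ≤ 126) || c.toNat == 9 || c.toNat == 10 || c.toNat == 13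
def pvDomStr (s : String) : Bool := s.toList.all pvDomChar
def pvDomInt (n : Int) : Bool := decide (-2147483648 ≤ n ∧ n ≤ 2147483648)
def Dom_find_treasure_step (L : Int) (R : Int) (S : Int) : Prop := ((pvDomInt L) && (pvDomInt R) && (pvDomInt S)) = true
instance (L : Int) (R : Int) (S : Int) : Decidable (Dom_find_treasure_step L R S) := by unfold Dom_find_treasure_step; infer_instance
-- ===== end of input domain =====

-- B replaces A's step-by-step zigzag simulation by a closed-form step count per target (objective: faster).

-- ===== PORT A =====
-- A's `while True` loop, ported with a fuel counter that provably never runs out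
-- (fuel is only a totality guard; the loop body is A's body step for step).
def pvLoopA (L R : Int) (fuel : Nat) (pos step delta sign : Int) : Int :=
  match fuel with
  | 0 => 0
  | f + 1 =>
    if L = pos ∨ R = pos then step
    else pvLoopA L R f (pos + sign * delta) (step + 1) (delta + 1) (-sign)

def find_treasure_step (L : Int) (R : Int) (S : Int) : Int :=
  pvLoopA L R (2 * (L - S).natAbs + 2 * (R - S).natAbs + 2) S 1 1 1

-- ===== PORT B =====
def pvStepsTo (S T : Int) : Int :=
  let d := T - S
  if d = 0 then 1 else if d > 0 then 2 * d else 1 - 2 * d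

def find_treasure_step_alt (L : Int) (R : Int) (S : Int) : Int :=
  min (pvStepsTo S L) (pvStepsTo S R)

-- ===== PRECONDITION & SPEC =====
def Spec_find_treasure_step (L : Int) (R : Int) (S : Int) (out : Int) : Prop := out = find_treasure_step_alt L R S
instance (L : Int) (R : Int) (S : Int) (out : Int) : Decidable (Spec_find_treasure_step L R S out) := by unfold Spec_find_treasure_step; infer_instance

-- ===== CLAIM (what is proved, stated in full; the proofs are below) =====
def Claim_equal_find_treasure_step : Prop := ∀ (L : Int) (R : Int) (S : Int), Dom_find_treasure_step L R S → Spec_find_treasure_step L R S (find_treasure_step L R S)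

-- ===== LEMMAS AND PROOFS =====

-- position of the walk at (1-based) step t : S, S+1, S-1, S+2, S-2, …
def pvPosAt (S : Int) (t : Nat) : Int :=
  if t % 2 = 0 then S + (t / 2 : Nat) else S - (t / 2 : Nat)

-- the sign the walk uses for the move taken AT step t
def pvSignAt (t : Nat) : Int := if t % 2 = 1 then 1 else -1

theorem pvStepsTo_pos (S T : Int) : 1 ≤ pvStepsTo S T := by
  unfold pvStepsTo; dsimp only; split_ifs <;> omega

-- the walk is at T at step t (t ≥ 1) exactly when t is T's closed-form step
theorem pvPosAt_eq_iff (S T : Int) (t : Nat) (ht : 1 ≤ t) :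
    pvPosAt S t = T ↔ (t : Int) = pvStepsTo S T := by
  unfold pvPosAt pvStepsTo; dsimp only; split_ifs <;> omega

theorem pvPosAt_succ (S : Int) (t : Nat) (ht : 1 ≤ t) :
    pvPosAt S t + pvSignAt t * (t : Int) = pvPosAt S (t + 1) := by
  unfold pvPosAt pvSignAt
  split_ifs <;> push_cast <;> omega

theorem pvSignAt_succ (t : Nat) : -pvSignAt t = pvSignAt (t + 1) := by
  unfold pvSignAt
  rcases Nat.even_or_odd t with h | h <;> rcases h with ⟨k, hk⟩ <;> subst hk <;> omega

-- main loop invariant: from the step-t state, with enough fuel, the loop returns the answer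
theorem pvLoopA_eval (L R S : Int) (fuel t : Nat) (ht : 1 ≤ t)
    (hle : (t : Int) ≤ find_treasure_step_alt L R S)
    (hfuel : find_treasure_step_alt L R S < (t : Int) + (fuel : Int)) :
    pvLoopA L R fuel (pvPosAt S t) (t : Int) (t : Int) (pvSignAt t)
      = find_treasure_step_alt L R S := by
  induction fuel generalizing t with
  | zero => push_cast at hfuel; omega
  | succ f ih =>
    unfold pvLoopA
    by_cases hhit : L = pvPosAt S t ∨ R = pvPosAt S t
    · simp only [hhit, if_true]
      rcases hhit with h | h
      · have := (pvPosAt_eq_iff S L t ht).mp h.symm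
        have hminL : find_treasure_step_alt L R S ≤ pvStepsTo S L := min_le_left _ _
        unfold find_treasure_step_alt at hle hminL ⊢; omega
      · have := (pvPosAt_eq_iff S R t ht).mp h.symm
        have hminR : find_treasure_step_alt L R S ≤ pvStepsTo S R := min_le_right _ _
        unfold find_treasure_step_alt at hle hminR ⊢; omega
    · simp only [hhit, if_false]
      -- t is strictly before the answer: otherwise one of the targets would be hit
      have hlt : (t : Int) < find_treasure_step_alt L R S := by
        rcases lt_or_eq_of_le hle with h | h
        · exact h
        · exfalso
          unfold find_treasure_step_alt at h
          rcases min_choice (pvStepsTo S L) (pvStepsTo S R) with hm | hm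
          · exact hhit (Or.inl ((pvPosAt_eq_iff S L t ht).mpr (by omega)).symm)
          · exact hhit (Or.inr ((pvPosAt_eq_iff S R t ht).mpr (by omega)).symm)
      have h1 := pvPosAt_succ S t ht
      have h2 := pvSignAt_succ t
      have := ih (t + 1) (by omega) (by push_cast; omega) (by push_cast at hfuel ⊢; omega)
      rw [h1, h2]
      push_cast at this ⊢
      convert this using 2

theorem pvPosAt_one (S : Int) : pvPosAt S 1 = S := by unfold pvPosAt; norm_num

-- ===== VERDICT (by name: the statement is the Claim_ definition above) =====
theorem find_treasure_step_spec : Claim_equal_find_treasure_step := by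
  intro L R S _
  unfold Spec_find_treasure_step find_treasure_step
  have h1 : pvSignAt 1 = 1 := by unfold pvSignAt; norm_num
  have hb1 : find_treasure_step_alt L R S ≤ pvStepsTo S L := min_le_left _ _
  have hb2 : 1 ≤ find_treasure_step_alt L R S :=
    le_min (pvStepsTo_pos S L) (pvStepsTo_pos S R)
  have hbound : find_treasure_step_alt L R S
      < 1 + ((2 * (L - S).natAbs + 2 * (R - S).natAbs + 2 : Nat) : Int) := by
    have hL : pvStepsTo S L ≤ 2 * |L - S| + 1 := by
      rcases abs_cases (L - S) with ⟨h1, h2⟩ | ⟨h1, h2⟩ <;> rw [h1] <;>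
        unfold pvStepsTo <;> dsimp only <;> split_ifs <;> omega
    have hR := abs_nonneg (R - S)
    push_cast; omega
  have := pvLoopA_eval L R S (2 * (L - S).natAbs + 2 * (R - S).natAbs + 2) 1
    (le_refl 1) (by exact_mod_cast hb2) (by exact_mod_cast hbound)
  rw [pvPosAt_one, h1] at this
  exact_mod_cast this
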